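-- pv_equiv track=rewrite | github.com/harrider/aoc-2025 | _aoc-tasks/day-02/aoc-day-02.py | sum_invalid_ids_in_range
-- ===== SOURCE A (Python) =====
-- from math import ceil
-- from typing import List, Tuple, Optional, Set
--
-- def get_repetition_multiplier(k: int, r: int) -> int:
--     """
--     Get the multiplier M for a k-digit base repeated r times.
--     M = 10^(k*(r-1)) + 10^(k*(r-2)) + ... + 10^k + 1 = (10^(k*r) - 1) / (10^k - 1)
--     """
--     return (10 ** (k * r) - 1) // (10 ** k - 1)
--
-- def get_base_bounds_for_repetition(k: int, r: int, start: int, end: int) -> Optional[Tuple[int, int, int]]: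
--     """
--     Get range of k-digit bases that, when repeated r times, fall within [start, end].
--     Returns (base_min, base_max, multiplier) or None if no valid bases exist.
--     """
--     M = get_repetition_multiplier(k, r)
--
--     # k-digit bases: 10^(k-1) to 10^k - 1 (or 1-9 for k=1)
--     base_lo = 1 if k == 1 else 10 ** (k - 1)
--     base_hi = 10 ** k - 1
--
--     # Clamp to bases whose repeated form falls in [start, end]
--     base_min = max(base_lo, ceil(start / M))
--     base_max = min(base_hi, end // M)
--
--     return (base_min, base_max, M) if base_min <= base_max else None
--
-- def sum_invalid_ids_in_range(start: int, end: int) -> int: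
--     """Sum all invalid IDs (pattern repeated exactly twice) within [start, end]."""
--     total = 0
--     max_k = (len(str(end)) + 1) // 2
--
--     for k in range(1, max_k + 1):
--         bounds = get_base_bounds_for_repetition(k, 2, start, end)
--         if bounds:
--             base_min, base_max, M = bounds
--             count = base_max - base_min + 1
--             total += M * count * (base_min + base_max) // 2
--
--     return total
-- ===== SOURCE B (Python) =====
-- def sum_invalid_ids_in_range(start: int, end: int) -> int:
--     """Sum all invalid IDs (pattern repeated exactly twice) within [start, end]."""
--     total = 0
--     max_k = (len(str(end)) + 1) // 2
--     for k in range(1, max_k + 1):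
--         m = 10 ** k + 1
--         lo = 1 if k == 1 else 10 ** (k - 1)
--         for base in range(lo, 10 ** k):
--             if start <= m * base <= end:
--                 total += m * base
--     return total
-- ===== Notes on version B (the rewrite author's own statement) =====
-- stated objective: simpler
-- what changed: A computes each digit-length's contribution in closed form (ceil/floor clamping of the base interval plus an arithmetic-series formula, via two helper functions); B simply scans every k-digit base, forms its doubled number m*base, and adds it when it lies in [start, end] - no helpers, no clamping, no series formula.
import Mathlib
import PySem

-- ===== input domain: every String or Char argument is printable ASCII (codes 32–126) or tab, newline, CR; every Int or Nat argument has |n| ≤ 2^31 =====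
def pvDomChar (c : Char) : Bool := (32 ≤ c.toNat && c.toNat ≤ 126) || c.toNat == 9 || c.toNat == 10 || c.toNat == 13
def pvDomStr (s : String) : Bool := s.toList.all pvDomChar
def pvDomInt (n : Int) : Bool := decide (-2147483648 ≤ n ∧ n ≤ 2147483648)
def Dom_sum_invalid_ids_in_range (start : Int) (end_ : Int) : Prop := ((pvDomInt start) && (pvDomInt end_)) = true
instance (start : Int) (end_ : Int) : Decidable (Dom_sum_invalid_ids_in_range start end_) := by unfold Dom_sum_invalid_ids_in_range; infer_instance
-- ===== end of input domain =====

-- B replaces A's per-digit-length ceil/floor clamping and arithmetic-series closed form by a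
-- direct scan over all k-digit bases with a membership test (objective: simpler/alternative, not faster).

-- ===== PORT A =====
-- get_repetition_multiplier: exponents k*r and k are nonnegative at every call site (k ≥ 1, r = 2),
-- so .toNat is exact there.
def pvGetRepetitionMultiplier (k : Int) (r : Int) : Int :=
  PySem.Int.floordiv (10 ^ (k * r).toNat - 1) (10 ^ k.toNat - 1)

-- get_base_bounds_for_repetition: math.ceil(start / M) is ported as exact ceiling division
-- -((-start) // M); exact on Dom (|start| ≤ 2^31 < 2^53 and 11 ≤ M ≤ 10^6+1, so the float
-- quotient start/M is within 2^-21 of the true value while non-integer quotients are ≥ 10^-7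
-- away from the nearest integer — float ceil equals exact ceil).
def pvGetBaseBoundsForRepetition (k : Int) (r : Int) (start : Int) (end_ : Int) :
    Option (Int × Int × Int) :=
  let M := pvGetRepetitionMultiplier k r
  let base_lo : Int := if k = 1 then 1 else 10 ^ (k - 1).toNat
  let base_hi : Int := 10 ^ k.toNat - 1
  let base_min := max base_lo (-(PySem.Int.floordiv (-start) M))
  let base_max := min base_hi (PySem.Int.floordiv end_ M)
  if base_min ≤ base_max then some (base_min, base_max, M) else none

def sum_invalid_ids_in_range (start : Int) (end_ : Int) : Int :=
  let max_k := PySem.Int.floordiv (PySem.Str.len (PySem.Int.toStr end_) + 1) 2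
  (PySem.List.pyRange 1 (max_k + 1) 1).foldl (fun total k =>
    match pvGetBaseBoundsForRepetition k 2 start end_ with
    | some (base_min, base_max, M) =>
        total + PySem.Int.floordiv (M * (base_max - base_min + 1) * (base_min + base_max)) 2
    | none => total) 0

-- ===== PORT B =====
def sum_invalid_ids_in_range_alt (start : Int) (end_ : Int) : Int :=
  let max_k := PySem.Int.floordiv (PySem.Str.len (PySem.Int.toStr end_) + 1) 2
  (PySem.List.pyRange 1 (max_k + 1) 1).foldl (fun total k =>
    let m : Int := 10 ^ k.toNat + 1
    let lo : Int := if k = 1 then 1 else 10 ^ (k - 1).toNat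
    (PySem.List.pyRange lo (10 ^ k.toNat) 1).foldl
      (fun t b => if start ≤ m * b ∧ m * b ≤ end_ then t + m * b else t) total) 0

-- ===== PRECONDITION & SPEC =====
def Spec_sum_invalid_ids_in_range (start : Int) (end_ : Int) (out : Int) : Prop := out = sum_invalid_ids_in_range_alt start end_
instance (start : Int) (end_ : Int) (out : Int) : Decidable (Spec_sum_invalid_ids_in_range start end_ out) := by unfold Spec_sum_invalid_ids_in_range; infer_instance

-- ===== CLAIM (what is proved, stated in full; the proofs are below) =====
def Claim_equal_sum_invalid_ids_in_range : Prop := ∀ (start : Int) (end_ : Int), Dom_sum_invalid_ids_in_range start end_ → Spec_sum_invalid_ids_in_range start end_ (sum_invalid_ids_in_range start end_)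

-- ===== LEMMAS AND PROOFS =====

-- the repetition multiplier for r = 2 and k ≥ 1 is 10^k + 1
lemma pvGRM_eq (k : Int) (hk : 1 ≤ k) :
    pvGetRepetitionMultiplier k 2 = 10 ^ k.toNat + 1 := by
  unfold pvGetRepetitionMultiplier
  have h2 : (k * 2).toNat = 2 * k.toNat := by omega
  have hn : 1 ≤ k.toNat := by omega
  set n := k.toNat with hndef
  have hx : (10:Int) ^ (2 * n) - 1 = (10 ^ n - 1) * (10 ^ n + 1) := by
    rw [mul_comm 2 n, pow_mul]; ring
  have hpos : (0:Int) < 10 ^ n - 1 := by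
    have : (10:Int) ^ 1 ≤ 10 ^ n := pow_le_pow_right₀ (by norm_num) hn
    simp at this; omega
  rw [h2, hx, PySem.Int.floordiv_eq_ediv_of_pos hpos,
    Int.mul_ediv_cancel_left _ (by omega)]

-- filtering an integer range by a ≤-window is the clamped range
lemma pvFilterRange (A B : Int) : ∀ (n : Nat) (lo hi : Int), (hi - lo).toNat = n →
    (PySem.List.pyRange lo hi 1).filter (fun b => decide (A ≤ b ∧ b ≤ B))
      = PySem.List.pyRange (max lo A) (min hi (B + 1)) 1 := by
  intro n
  induction n with
  | zero =>
    intro lo hi h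
    rw [PySem.List.pyRange_one_eq_nil (by omega), PySem.List.pyRange_one_eq_nil (by omega)]
    rfl
  | succ n ih =>
    intro lo hi h
    rw [PySem.List.pyRange_one_cons (by omega), List.filter_cons]
    by_cases hp : A ≤ lo ∧ lo ≤ B
    · simp only [hp]
      rw [ih (lo + 1) hi (by omega), show max lo A = lo by omega,
        show max (lo + 1) A = lo + 1 by omega,
        PySem.List.pyRange_one_cons (show lo < min hi (B + 1) by omega)]
      simp
    · simp only [hp]
      rw [ih (lo + 1) hi (by omega)]
      by_cases hA : lo < A
      · rw [show max (lo + 1) A = max lo A by omega]; simp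
      · rw [PySem.List.pyRange_one_eq_nil (by omega),
          PySem.List.pyRange_one_eq_nil (by omega)]; simp

-- Gauss: twice the sum of the integers in [u, v) is (v-u)(u+v-1)
lemma pvGauss : ∀ (n : Nat) (u v : Int), (v - u).toNat = n → u ≤ v →
    2 * (PySem.List.pyRange u v 1).sum = (v - u) * (u + v - 1) := by
  intro n
  induction n with
  | zero =>
    intro u v h huv
    rw [PySem.List.pyRange_one_eq_nil (by omega)]
    simp; omega
  | succ n ih =>
    intro u v h huv
    rw [PySem.List.pyRange_one_cons (by omega), List.sum_cons]
    have := ih (u + 1) v (by omega) (by omega)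
    linear_combination this

-- the per-k contribution of A equals B's inner scan
lemma pvPerK (start end_ total k : Int) (hk : 1 ≤ k) :
    (match pvGetBaseBoundsForRepetition k 2 start end_ with
     | some (base_min, base_max, M) =>
         total + PySem.Int.floordiv (M * (base_max - base_min + 1) * (base_min + base_max)) 2
     | none => total)
    = (PySem.List.pyRange (if k = 1 then 1 else (10:Int) ^ (k - 1).toNat) ((10:Int) ^ k.toNat) 1).foldl
        (fun t b => if start ≤ ((10:Int) ^ k.toNat + 1) * b ∧ ((10:Int) ^ k.toNat + 1) * b ≤ end_
                    then t + ((10:Int) ^ k.toNat + 1) * b else t) total := by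
  have hM : pvGetRepetitionMultiplier k 2 = 10 ^ k.toNat + 1 := pvGRM_eq k hk
  simp only [pvGetBaseBoundsForRepetition, hM]
  set n := k.toNat with hn
  set M : Int := 10 ^ n + 1 with hMdef
  have hMpos : 0 < M := by positivity
  set lo : Int := if k = 1 then 1 else (10:Int) ^ (k - 1).toNat with hlo
  set A := -(PySem.Int.floordiv (-start) M) with hA
  set B := PySem.Int.floordiv end_ M with hB
  have hcond : ∀ b : Int, (start ≤ M * b ∧ M * b ≤ end_) ↔ (A ≤ b ∧ b ≤ B) := by
    intro b
    have h1 : (b ≤ B) ↔ b * M ≤ end_ := PySem.Int.le_floordiv_iff_mul_le hMpos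
    have h2 : (-b ≤ PySem.Int.floordiv (-start) M) ↔ (-b) * M ≤ -start :=
      PySem.Int.le_floordiv_iff_mul_le hMpos
    rw [neg_mul] at h2
    have hc : M * b = b * M := mul_comm M b
    constructor
    · rintro ⟨u, v⟩
      have h3 := h2.mpr (by linarith)
      exact ⟨by omega, h1.mpr (by linarith)⟩
    · rintro ⟨u, v⟩
      have h3 := h2.mp (by omega)
      exact ⟨by linarith, by linarith [h1.mp v]⟩
  simp only [hcond]
  rw [PySem.List.foldl_ite_eq_foldl_filter (fun b => A ≤ b ∧ b ≤ B) (fun t b => t + M * b)]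
  rw [pvFilterRange A B ((10 ^ n : Int) - lo).toNat lo ((10:Int) ^ n) rfl]
  rw [PySem.List.foldl_add (g := fun b : Int => M * b)]
  rw [show (fun b : Int => M * b) = (fun b : Int => M * id b) from rfl, List.sum_map_mul_left,
    List.map_id]
  by_cases hcase : max lo A ≤ min ((10:Int) ^ n - 1) B
  · rw [if_pos hcase]
    dsimp only
    have hv : min ((10:Int) ^ n) (B + 1) = min ((10:Int) ^ n - 1) B + 1 := by omega
    rw [hv]
    have hG := pvGauss ((min ((10:Int) ^ n - 1) B + 1) - max lo A).toNat (max lo A)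
      (min ((10:Int) ^ n - 1) B + 1) rfl (by omega)
    rw [PySem.Int.floordiv_eq_ediv_of_pos (by norm_num : (0:Int) < 2)]
    rw [show M * (min ((10:Int) ^ n - 1) B - max lo A + 1) * (max lo A + min ((10:Int) ^ n - 1) B)
        = 2 * (M * (PySem.List.pyRange (max lo A) (min ((10:Int) ^ n - 1) B + 1) 1).sum) by
      linear_combination (-M) * hG]
    rw [Int.mul_ediv_cancel_left _ (by norm_num : (2:Int) ≠ 0)]
  · rw [if_neg hcase]
    dsimp only
    rw [PySem.List.pyRange_one_eq_nil (by omega)]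
    simp

-- ===== VERDICT (by name: the statement is the Claim_ definition above) =====
theorem sum_invalid_ids_in_range_spec : Claim_equal_sum_invalid_ids_in_range := by
  intro start end_ _
  unfold Spec_sum_invalid_ids_in_range sum_invalid_ids_in_range sum_invalid_ids_in_range_alt
  simp only []
  refine PySem.List.foldl_congr_mem _ _ _ _ ?_
  intro total k hmem
  have hk : 1 ≤ k := (PySem.List.mem_pyRange_one.mp hmem).1
  exact pvPerK start end_ total k hk
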